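-- pv_equiv track=rewrite | github.com/YatindraRai002/Local-Artisian_AI | api/search.py | match_state
-- ===== SOURCE A (Python) =====
-- state_mapping = {
--     "andhra pradesh": ["andhra pradesh", "ap", "andhra"],
--     "arunachal pradesh": ["arunachal pradesh", "arunachal"],
--     "assam": ["assam"],
--     "bihar": ["bihar"],
--     "chhattisgarh": ["chhattisgarh", "chattisgarh", "cg"],
--     "goa": ["goa"],
--     "gujarat": ["gujarat", "gj"],
--     "haryana": ["haryana", "hr"],
--     "himachal pradesh": ["himachal pradesh", "himachal", "hp", "h.p."],
--     "jammu & kashmir": ["jammu & kashmir", "jammu and kashmir", "jammu kashmir", "j&k", "jk", "kashmir", "jammu"],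
--     "jharkhand": ["jharkhand", "jh"],
--     "karnataka": ["karnataka", "kn", "mysore"],
--     "kerala": ["kerala", "kl", "kerela"],
--     "madhya pradesh": ["madhya pradesh", "mp", "m.p.", "central pradesh"],
--     "maharashtra": ["maharashtra", "mh"],
--     "manipur": ["manipur", "mn"],
--     "meghalaya": ["meghalaya", "ml"],
--     "mizoram": ["mizoram", "mz"],
--     "nagaland": ["nagaland", "nl"],
--     "odisha": ["odisha", "orissa", "or"],
--     "punjab": ["punjab", "pb"],
--     "rajasthan": ["rajasthan", "rj"],
--     "sikkim": ["sikkim", "sk"],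
--     "tamil nadu": ["tamil nadu", "tamilnadu", "tamil naidu", "tn"],
--     "telangana": ["telangana", "ts"],
--     "tripura": ["tripura", "tr"],
--     "uttar pradesh": ["uttar pradesh", "up", "u.p."],
--     "uttarakhand": ["uttarakhand", "uttaranchal", "uk", "ua"],
--     "west bengal": ["west bengal", "bengal", "wb"],
--     "ladakh": ["ladakh"],
--     "delhi": ["delhi", "new delhi", "dl"],
--     "chandigarh": ["chandigarh", "ch"],
--     "puducherry": ["puducherry", "pondicherry", "py"],
--     "andaman and nicobar islands": ["andaman", "nicobar", "andaman and nicobar", "an"],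
--     "dadra and nagar haveli": ["dadra", "nagar haveli", "dadra and nagar haveli", "dn"],
--     "daman and diu": ["daman", "diu", "daman and diu", "dd"],
--     "lakshadweep": ["lakshadweep", "ld"],
-- }
--
-- def match_state(search_state, artist_state):
--     if not search_state or not artist_state:
--         return False
--
--     search_lower = search_state.lower().strip()
--     artist_lower = artist_state.lower().strip()
--
--     # direct match
--     if artist_lower in search_lower or search_lower in artist_lower:
--         return True
--
--     # check against state variations
--     for canonical, variations in state_mapping.items():
--         search_matches = any(
--             search_lower == v or search_lower in v or v in search_lower for v in variations
--         )
--         artist_matches = any(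
--             artist_lower == v or artist_lower in v or v in artist_lower for v in variations
--         ) or canonical in artist_lower or artist_lower in canonical
--         if search_matches and artist_matches:
--             return True
--
--     # normalize "&"
--     search_norm = search_lower.replace("&", "and").replace("  ", " ")
--     artist_norm = artist_lower.replace("&", "and").replace("  ", " ")
--     return search_norm in artist_norm or artist_norm in search_norm
-- ===== SOURCE B (Python) =====
-- state_mapping = {
--     "andhra pradesh": ["andhra pradesh", "ap", "andhra"],
--     "arunachal pradesh": ["arunachal pradesh", "arunachal"],
--     "assam": ["assam"],
--     "bihar": ["bihar"],
--     "chhattisgarh": ["chhattisgarh", "chattisgarh", "cg"],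
--     "goa": ["goa"],
--     "gujarat": ["gujarat", "gj"],
--     "haryana": ["haryana", "hr"],
--     "himachal pradesh": ["himachal pradesh", "himachal", "hp", "h.p."],
--     "jammu & kashmir": ["jammu & kashmir", "jammu and kashmir", "jammu kashmir", "j&k", "jk", "kashmir", "jammu"],
--     "jharkhand": ["jharkhand", "jh"],
--     "karnataka": ["karnataka", "kn", "mysore"],
--     "kerala": ["kerala", "kl", "kerela"],
--     "madhya pradesh": ["madhya pradesh", "mp", "m.p.", "central pradesh"],
--     "maharashtra": ["maharashtra", "mh"],
--     "manipur": ["manipur", "mn"],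
--     "meghalaya": ["meghalaya", "ml"],
--     "mizoram": ["mizoram", "mz"],
--     "nagaland": ["nagaland", "nl"],
--     "odisha": ["odisha", "orissa", "or"],
--     "punjab": ["punjab", "pb"],
--     "rajasthan": ["rajasthan", "rj"],
--     "sikkim": ["sikkim", "sk"],
--     "tamil nadu": ["tamil nadu", "tamilnadu", "tamil naidu", "tn"],
--     "telangana": ["telangana", "ts"],
--     "tripura": ["tripura", "tr"],
--     "uttar pradesh": ["uttar pradesh", "up", "u.p."],
--     "uttarakhand": ["uttarakhand", "uttaranchal", "uk", "ua"],
--     "west bengal": ["west bengal", "bengal", "wb"],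
--     "ladakh": ["ladakh"],
--     "delhi": ["delhi", "new delhi", "dl"],
--     "chandigarh": ["chandigarh", "ch"],
--     "puducherry": ["puducherry", "pondicherry", "py"],
--     "andaman and nicobar islands": ["andaman", "nicobar", "andaman and nicobar", "an"],
--     "dadra and nagar haveli": ["dadra", "nagar haveli", "dadra and nagar haveli", "dn"],
--     "daman and diu": ["daman", "diu", "daman and diu", "dd"],
--     "lakshadweep": ["lakshadweep", "ld"],
-- }
--
-- # Inverted index built once at import time: every alias as its own row.
-- VARIANT_INDEX = [(v, c) for c, vs in state_mapping.items() for v in vs]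
-- CANONICALS = list(state_mapping)
--
--
-- def _overlap(x, y):
--     """Symmetric substring overlap (subsumes equality)."""
--     return x in y or y in x
--
--
-- def match_state(search_state, artist_state):
--     if not search_state or not artist_state:
--         return False
--
--     s = search_state.lower().strip()
--     a = artist_state.lower().strip()
--
--     # direct match
--     if _overlap(a, s):
--         return True
--
--     # single accumulator pass over the flattened alias index
--     s_hits, a_hits = set(), set()
--     for v, c in VARIANT_INDEX:
--         if _overlap(s, v):
--             s_hits.add(c)
--         if _overlap(a, v):
--             a_hits.add(c)
--     # artist side additionally matches on the canonical name itself
--     for c in CANONICALS: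
--         if _overlap(a, c):
--             a_hits.add(c)
--     if s_hits & a_hits:
--         return True
--
--     # normalize "&"
--     s_norm = s.replace("&", "and").replace("  ", " ")
--     a_norm = a.replace("&", "and").replace("  ", " ")
--     return s_norm in a_norm or a_norm in s_norm
-- ===== Notes on version B (the rewrite author's own statement) =====
-- stated objective: alternative
-- what changed: A's per-key scan with two any() passes over each key's alias list and early return is replaced by a flattened (alias, canonical) inverted index built once at import, traversed in a single accumulator pass that fills two canonical-hit sets (plus a canonical-name pass for the artist side, with the redundant equality test dropped), followed by a set intersection.
import Mathlib
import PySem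

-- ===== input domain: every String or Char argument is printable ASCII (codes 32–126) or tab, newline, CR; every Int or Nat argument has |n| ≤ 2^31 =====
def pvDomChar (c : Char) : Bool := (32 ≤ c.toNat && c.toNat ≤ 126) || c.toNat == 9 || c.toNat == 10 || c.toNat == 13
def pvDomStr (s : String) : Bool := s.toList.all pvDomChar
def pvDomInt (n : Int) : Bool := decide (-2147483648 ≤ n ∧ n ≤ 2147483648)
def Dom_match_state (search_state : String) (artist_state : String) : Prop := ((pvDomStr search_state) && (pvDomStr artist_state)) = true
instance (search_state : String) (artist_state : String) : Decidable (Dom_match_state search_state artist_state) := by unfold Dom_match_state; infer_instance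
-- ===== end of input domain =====

-- B replaces A's per-key scan (two any()s over each key's alias list, early return) by a
-- flattened (alias, canonical) inverted index traversed once with two accumulator sets that
-- are intersected afterwards; guards and the final normalization check are kept (objective:
-- alternative decomposition, same cost on the fixed table).

-- ===== PORT A =====
def stateMapping : List (String × List String) := [
  ("andhra pradesh", ["andhra pradesh", "ap", "andhra"]),
  ("arunachal pradesh", ["arunachal pradesh", "arunachal"]),
  ("assam", ["assam"]),
  ("bihar", ["bihar"]),
  ("chhattisgarh", ["chhattisgarh", "chattisgarh", "cg"]),
  ("goa", ["goa"]),
  ("gujarat", ["gujarat", "gj"]),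
  ("haryana", ["haryana", "hr"]),
  ("himachal pradesh", ["himachal pradesh", "himachal", "hp", "h.p."]),
  ("jammu & kashmir", ["jammu & kashmir", "jammu and kashmir", "jammu kashmir", "j&k", "jk", "kashmir", "jammu"]),
  ("jharkhand", ["jharkhand", "jh"]),
  ("karnataka", ["karnataka", "kn", "mysore"]),
  ("kerala", ["kerala", "kl", "kerela"]),
  ("madhya pradesh", ["madhya pradesh", "mp", "m.p.", "central pradesh"]),
  ("maharashtra", ["maharashtra", "mh"]),
  ("manipur", ["manipur", "mn"]),
  ("meghalaya", ["meghalaya", "ml"]),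
  ("mizoram", ["mizoram", "mz"]),
  ("nagaland", ["nagaland", "nl"]),
  ("odisha", ["odisha", "orissa", "or"]),
  ("punjab", ["punjab", "pb"]),
  ("rajasthan", ["rajasthan", "rj"]),
  ("sikkim", ["sikkim", "sk"]),
  ("tamil nadu", ["tamil nadu", "tamilnadu", "tamil naidu", "tn"]),
  ("telangana", ["telangana", "ts"]),
  ("tripura", ["tripura", "tr"]),
  ("uttar pradesh", ["uttar pradesh", "up", "u.p."]),
  ("uttarakhand", ["uttarakhand", "uttaranchal", "uk", "ua"]),
  ("west bengal", ["west bengal", "bengal", "wb"]),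
  ("ladakh", ["ladakh"]),
  ("delhi", ["delhi", "new delhi", "dl"]),
  ("chandigarh", ["chandigarh", "ch"]),
  ("puducherry", ["puducherry", "pondicherry", "py"]),
  ("andaman and nicobar islands", ["andaman", "nicobar", "andaman and nicobar", "an"]),
  ("dadra and nagar haveli", ["dadra", "nagar haveli", "dadra and nagar haveli", "dn"]),
  ("daman and diu", ["daman", "diu", "daman and diu", "dd"]),
  ("lakshadweep", ["lakshadweep", "ld"])
]

-- search-side predicate of A's loop body
def searchVarHit (sl : String) (vs : List String) : Bool :=
  vs.any (fun v => sl == v || PySem.Str.isIn sl v || PySem.Str.isIn v sl)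

-- artist-side predicate of A's loop body
def artistVarHit (al : String) (c : String) (vs : List String) : Bool :=
  vs.any (fun v => al == v || PySem.Str.isIn al v || PySem.Str.isIn v al)
    || PySem.Str.isIn c al || PySem.Str.isIn al c

-- A's 'for canonical, variations in state_mapping.items(): … return True' loop
def matchLoop (sl al : String) : List (String × List String) → Bool
  | [] => false
  | (c, vs) :: rest =>
      if searchVarHit sl vs && artistVarHit al c vs then true
      else matchLoop sl al rest

def match_state (search_state : String) (artist_state : String) : Bool :=
  if search_state == "" || artist_state == "" then false
  else
    let search_lower := PySem.Str.strip (PySem.Str.lower search_state)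
    let artist_lower := PySem.Str.strip (PySem.Str.lower artist_state)
    if PySem.Str.isIn artist_lower search_lower || PySem.Str.isIn search_lower artist_lower then true
    else if matchLoop search_lower artist_lower stateMapping then true
    else
      let search_norm := PySem.Str.replace (PySem.Str.replace search_lower "&" "and") "  " " "
      let artist_norm := PySem.Str.replace (PySem.Str.replace artist_lower "&" "and") "  " " "
      PySem.Str.isIn search_norm artist_norm || PySem.Str.isIn artist_norm search_norm

-- ===== PORT B =====
-- _overlap(x, y)
def pyOverlap (x y : String) : Bool := PySem.Str.isIn x y || PySem.Str.isIn y x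

-- VARIANT_INDEX = [(v, c) for c, vs in state_mapping.items() for v in vs]
def variantIndex : List (String × String) :=
  stateMapping.flatMap (fun p => p.2.map (fun v => (v, p.1)))

-- CANONICALS = list(state_mapping)
def canonicals : List String := stateMapping.map Prod.fst

def match_state_alt (search_state : String) (artist_state : String) : Bool :=
  if search_state == "" || artist_state == "" then false
  else
    let s := PySem.Str.strip (PySem.Str.lower search_state)
    let a := PySem.Str.strip (PySem.Str.lower artist_state)
    if pyOverlap a s then true
    else
      -- single accumulator pass over the flattened alias index
      let hits := variantIndex.foldl
        (fun (st : PySem.Set String × PySem.Set String) vc =>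
          (if pyOverlap s vc.1 then PySem.Set.add st.1 vc.2 else st.1,
           if pyOverlap a vc.1 then PySem.Set.add st.2 vc.2 else st.2))
        (PySem.Set.empty, PySem.Set.empty)
      -- artist side additionally matches on the canonical name itself
      let aHits := canonicals.foldl
        (fun (st : PySem.Set String) c => if pyOverlap a c then PySem.Set.add st c else st)
        hits.2
      if !(PySem.Set.inter hits.1 aHits).isEmpty then true
      else
        let s_norm := PySem.Str.replace (PySem.Str.replace s "&" "and") "  " " "
        let a_norm := PySem.Str.replace (PySem.Str.replace a "&" "and") "  " " "
        PySem.Str.isIn s_norm a_norm || PySem.Str.isIn a_norm s_norm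

-- ===== PRECONDITION & SPEC =====
def Spec_match_state (search_state : String) (artist_state : String) (out : Bool) : Prop := out = match_state_alt search_state artist_state
instance (search_state : String) (artist_state : String) (out : Bool) : Decidable (Spec_match_state search_state artist_state out) := by unfold Spec_match_state; infer_instance

-- ===== CLAIM =====
def Claim_equal_match_state : Prop := ∀ (search_state : String) (artist_state : String), Dom_match_state search_state artist_state → Spec_match_state search_state artist_state (match_state search_state artist_state)

-- ===== LEMMAS AND PROOFS =====

-- Python equality implies substring containment, so A's '== v' disjunct is redundant
theorem eq_imp_isIn (x v : String) (h : (x == v) = true) : PySem.Str.isIn x v = true := by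
  rw [PySem.Str.isIn_iff_infix]
  exact (beq_iff_eq.mp h) ▸ List.infix_refl _

theorem elem_overlap (x v : String) :
    (x == v || PySem.Str.isIn x v || PySem.Str.isIn v x) = pyOverlap x v := by
  unfold pyOverlap
  cases he : (x == v)
  · simp
  · rw [eq_imp_isIn x v he]
    simp

theorem varHit_eq_overlap (x : String) (vs : List String) :
    vs.any (fun v => x == v || PySem.Str.isIn x v || PySem.Str.isIn v x)
      = vs.any (fun v => pyOverlap x v) := by
  have h : (fun v => x == v || PySem.Str.isIn x v || PySem.Str.isIn v x)
      = fun v => pyOverlap x v := funext (elem_overlap x)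
  rw [h]

-- membership in a conditional-add set fold
theorem mem_foldl_add {α : Type} (pred : α → Bool) (key : α → String)
    (xs : List α) (init : PySem.Set String) (x : String) :
    x ∈ xs.foldl (fun st p => if pred p then PySem.Set.add st (key p) else st) init ↔
      x ∈ init ∨ ∃ p ∈ xs, pred p = true ∧ key p = x := by
  induction xs generalizing init with
  | nil => simp
  | cons hd tl ih =>
      simp only [List.foldl_cons, ih, List.mem_cons]
      cases hp : pred hd
      · constructor
        · rintro (h | h)
          · exact Or.inl h
          · obtain ⟨p, hm, h1, h2⟩ := h; exact Or.inr ⟨p, Or.inr hm, h1, h2⟩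
        · rintro (h | ⟨p, hm, h1, h2⟩)
          · exact Or.inl h
          · rcases hm with rfl | hm
            · rw [hp] at h1; exact absurd h1 (by simp)
            · exact Or.inr ⟨p, hm, h1, h2⟩
      · rw [if_pos rfl, PySem.Set.mem_add]
        constructor
        · rintro ((h | h) | h)
          · exact Or.inl h
          · exact Or.inr ⟨hd, Or.inl rfl, hp, h.symm⟩
          · obtain ⟨p, hm, h1, h2⟩ := h; exact Or.inr ⟨p, Or.inr hm, h1, h2⟩
        · rintro (h | ⟨p, hm, h1, h2⟩)
          · exact Or.inl (Or.inl h)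
          · rcases hm with rfl | hm
            · exact Or.inl (Or.inr h2.symm)
            · exact Or.inr ⟨p, hm, h1, h2⟩

-- the pair fold splits into two independent set folds
theorem pair_foldl_split (s a : String) (xs : List (String × String))
    (i1 i2 : PySem.Set String) :
    xs.foldl
      (fun (st : PySem.Set String × PySem.Set String) vc =>
        (if pyOverlap s vc.1 then PySem.Set.add st.1 vc.2 else st.1,
         if pyOverlap a vc.1 then PySem.Set.add st.2 vc.2 else st.2))
      (i1, i2)
    = (xs.foldl (fun st vc => if pyOverlap s vc.1 then PySem.Set.add st vc.2 else st) i1,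
       xs.foldl (fun st vc => if pyOverlap a vc.1 then PySem.Set.add st vc.2 else st) i2) := by
  induction xs generalizing i1 i2 with
  | nil => rfl
  | cons hd tl ih => simp only [List.foldl_cons, ih]

theorem stateMapping_keys_nodup : (stateMapping.map Prod.fst).Nodup := by decide

theorem key_inj {c : String} {vs1 vs2 : List String}
    (h1 : (c, vs1) ∈ stateMapping) (h2 : (c, vs2) ∈ stateMapping) : vs1 = vs2 := by
  have := List.inj_on_of_nodup_map stateMapping_keys_nodup h1 h2 rfl
  exact congrArg Prod.snd this

-- membership in a variant-index fold, phrased over stateMapping entries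
theorem mem_variant_fold (q : String) (x : String) :
    x ∈ variantIndex.foldl (fun st vc => if pyOverlap q vc.1 then PySem.Set.add st vc.2 else st)
        PySem.Set.empty ↔
      ∃ vs, (x, vs) ∈ stateMapping ∧ vs.any (fun v => pyOverlap q v) = true := by
  rw [mem_foldl_add (fun vc => pyOverlap q vc.1) Prod.snd]
  simp only [PySem.Set.empty, List.not_mem_nil, false_or]
  constructor
  · rintro ⟨⟨v, c⟩, hm, hp, rfl⟩
    unfold variantIndex at hm
    rw [List.mem_flatMap] at hm
    obtain ⟨⟨c', vs⟩, hmap, hv⟩ := hm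
    rw [List.mem_map] at hv
    obtain ⟨v', hv', heq⟩ := hv
    injection heq with hveq hceq
    subst hveq; subst hceq
    exact ⟨vs, hmap, List.any_eq_true.mpr ⟨v', hv', hp⟩⟩
  · rintro ⟨vs, hm, hany⟩
    obtain ⟨v, hv, hp⟩ := List.any_eq_true.mp hany
    refine ⟨(v, x), ?_, hp, rfl⟩
    unfold variantIndex
    rw [List.mem_flatMap]
    exact ⟨(x, vs), hm, List.mem_map.mpr ⟨v, hv, rfl⟩⟩

-- A's loop returns true iff some entry satisfies both predicates
theorem matchLoop_eq_true_iff (sl al : String) (m : List (String × List String)) :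
    matchLoop sl al m = true ↔
      ∃ c vs, (c, vs) ∈ m ∧ searchVarHit sl vs = true ∧ artistVarHit al c vs = true := by
  induction m with
  | nil => simp [matchLoop]
  | cons p rest ih =>
      obtain ⟨c, vs⟩ := p
      simp only [matchLoop]
      split_ifs with h
      · simp only [Bool.and_eq_true] at h
        simp only [List.mem_cons, true_iff]
        exact ⟨c, vs, Or.inl rfl, h.1, h.2⟩
      · rw [ih]
        constructor
        · rintro ⟨c', vs', hm, h1, h2⟩
          exact ⟨c', vs', List.mem_cons_of_mem _ hm, h1, h2⟩
        · rintro ⟨c', vs', hm, h1, h2⟩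
          rcases List.mem_cons.mp hm with heq | hm'
          · exfalso; apply h; rw [Bool.and_eq_true]; cases heq; exact ⟨h1, h2⟩
          · exact ⟨c', vs', hm', h1, h2⟩

-- characterize the artist-side set after both of B's passes
theorem mem_artist_hits (a x : String) :
    x ∈ canonicals.foldl (fun st c => if pyOverlap a c then PySem.Set.add st c else st)
        (variantIndex.foldl (fun st vc => if pyOverlap a vc.1 then PySem.Set.add st vc.2 else st)
          PySem.Set.empty) ↔
      ∃ vs, (x, vs) ∈ stateMapping ∧ (vs.any (fun v => pyOverlap a v) || pyOverlap a x) = true := by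
  rw [mem_foldl_add (fun c : String => pyOverlap a c) (fun c => c)]
  rw [mem_variant_fold]
  constructor
  · rintro (⟨vs, hm, hany⟩ | ⟨c, hc, hp, rfl⟩)
    · exact ⟨vs, hm, by rw [Bool.or_eq_true]; exact Or.inl hany⟩
    · unfold canonicals at hc
      rw [List.mem_map] at hc
      obtain ⟨⟨c', vs⟩, hm, rfl⟩ := hc
      exact ⟨vs, hm, by rw [Bool.or_eq_true]; exact Or.inr hp⟩
  · rintro ⟨vs, hm, h⟩
    rw [Bool.or_eq_true] at h
    rcases h with h | h
    · exact Or.inl ⟨vs, hm, h⟩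
    · refine Or.inr ⟨x, ?_, h, rfl⟩
      unfold canonicals
      exact List.mem_map.mpr ⟨(x, vs), hm, rfl⟩

-- B's intersection is nonempty iff A's loop fires
theorem inter_eq_matchLoop (s a : String) :
    (!(PySem.Set.inter
        (variantIndex.foldl (fun st vc => if pyOverlap s vc.1 then PySem.Set.add st vc.2 else st)
          PySem.Set.empty)
        (canonicals.foldl (fun st c => if pyOverlap a c then PySem.Set.add st c else st)
          (variantIndex.foldl (fun st vc => if pyOverlap a vc.1 then PySem.Set.add st vc.2 else st)
            PySem.Set.empty))).isEmpty)
      = matchLoop s a stateMapping := by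
  rw [Bool.eq_iff_iff]
  rw [Bool.not_eq_true', List.isEmpty_eq_false_iff_exists_mem]
  rw [matchLoop_eq_true_iff]
  constructor
  · rintro ⟨x, hx⟩
    rw [PySem.Set.mem_inter, mem_variant_fold, mem_artist_hits] at hx
    obtain ⟨⟨vs1, hm1, hs⟩, ⟨vs2, hm2, ha⟩⟩ := hx
    cases key_inj hm1 hm2
    refine ⟨x, vs1, hm1, ?_, ?_⟩
    · unfold searchVarHit; rw [varHit_eq_overlap]; exact hs
    · unfold artistVarHit
      rw [varHit_eq_overlap, Bool.or_eq_true, Bool.or_eq_true]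
      rw [Bool.or_eq_true] at ha
      unfold pyOverlap at ha
      rcases ha with h | h
      · exact Or.inl (Or.inl h)
      · rw [Bool.or_eq_true] at h
        rcases h with h | h
        · exact Or.inr h
        · exact Or.inl (Or.inr h)
  · rintro ⟨c, vs, hm, hs, ha⟩
    refine ⟨c, ?_⟩
    rw [PySem.Set.mem_inter, mem_variant_fold, mem_artist_hits]
    refine ⟨⟨vs, hm, ?_⟩, ⟨vs, hm, ?_⟩⟩
    · unfold searchVarHit at hs; rw [varHit_eq_overlap] at hs; exact hs
    · unfold artistVarHit at ha
      rw [varHit_eq_overlap, Bool.or_eq_true, Bool.or_eq_true] at ha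
      rw [Bool.or_eq_true]
      rcases ha with h | h
      · rcases h with h | h
        · exact Or.inl h
        · exact Or.inr (by unfold pyOverlap; rw [Bool.or_eq_true]; exact Or.inr h)
      · exact Or.inr (by unfold pyOverlap; rw [Bool.or_eq_true]; exact Or.inl h)

-- ===== VERDICT =====
theorem match_state_spec : Claim_equal_match_state := by
  intro search_state artist_state _
  unfold Spec_match_state match_state match_state_alt
  simp only [pair_foldl_split, inter_eq_matchLoop]
  rfl
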